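-- pv_equiv track=rewrite | github.com/ldo/crosscode11 | crosscode11.py | rad50
-- ===== SOURCE A (Python) =====
-- def rad50(s) :
--     """returns the radix-50 encoding of s, which must be a string or a bytes
--     value. The result will be a list of integers, one for each group of 3
--     characters/bytes in s. If its length is not a multiple of 3, the last
--     group will be padded on the end with blanks."""
--     if not isinstance(s, bytes) :
--         s = s.encode()
--     #end if
--     if len(s) % 3 != 0 :
--         s += b"  "[0 : 3 - len(s) % 3]
--     #end if
--     result = []
--     n = None
--     for c in s :
--         if n == None :
--             n = 0
--             i = 64000
--         #end if
--         if c >= ord(b'a') and c <= ord(b'z') :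
--             c = c - ord(b'a') + 1
--         elif c >= ord(b'A') and c <= ord(b'Z') :
--             c = c - ord(b'A') + 1
--         elif c >= ord(b'0') and c <= ord(b'9') :
--             c = c - ord(b'0') + 30
--         elif c == ord(b' ') :
--             c = 0
--         elif c == ord(b'$') :
--             c = 27
--         elif c == ord(b'.') :
--             c = 28
--         else :
--             c = 29
--         #end if
--         i //= 40
--         n += c * i
--         if i == 1 :
--             result.append(n)
--             n = None
--         #end if
--     #end for
--     return \
--         tuple(result)
-- ===== SOURCE B (Python) =====
-- def rad50(s):
--     if not isinstance(s, bytes):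
--         s = s.encode()
--     if len(s) % 3 != 0:
--         s += b"  "[0 : 3 - len(s) % 3]
--     def t(c):
--         if ord(b'a') <= c <= ord(b'z'):
--             return c - ord(b'a') + 1
--         if ord(b'A') <= c <= ord(b'Z'):
--             return c - ord(b'A') + 1
--         if ord(b'0') <= c <= ord(b'9'):
--             return c - ord(b'0') + 30
--         if c == ord(b' '):
--             return 0
--         if c == ord(b'$'):
--             return 27
--         if c == ord(b'.'):
--             return 28
--         return 29
--     return tuple((t(s[k]) * 40 + t(s[k + 1])) * 40 + t(s[k + 2])
--                  for k in range(0, len(s), 3))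
-- ===== Notes on version B (the rewrite author's own statement) =====
-- stated objective: simpler
-- what changed: Replaces the sentinel-driven flat loop (n=None restart, i//=40 weight counter, append-on-i==1) with an explicit chunk-into-3-byte-groups pass computing each group's value by the closed formula (t(a)*40+t(b))*40+t(c).
import Mathlib
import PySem

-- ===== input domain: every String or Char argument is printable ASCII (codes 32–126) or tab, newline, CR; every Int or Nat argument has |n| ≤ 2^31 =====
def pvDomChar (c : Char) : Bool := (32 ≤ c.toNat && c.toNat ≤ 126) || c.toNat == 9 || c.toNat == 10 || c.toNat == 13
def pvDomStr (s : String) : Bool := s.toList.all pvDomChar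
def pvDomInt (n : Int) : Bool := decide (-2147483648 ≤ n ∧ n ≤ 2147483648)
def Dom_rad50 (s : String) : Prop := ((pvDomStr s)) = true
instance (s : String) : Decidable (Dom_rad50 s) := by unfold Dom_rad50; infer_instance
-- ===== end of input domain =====

-- B replaces A's sentinel-driven flat loop with an explicit 3-byte-group chunking pass
-- computing each group by the closed formula (t a * 40 + t b) * 40 + t c (objective: simpler).


-- ===== PORT A =====
-- s.encode(): on the ASCII domain, the byte values are the char codes
def rad50Bytes (s : String) : List Int :=
  s.toList.map (fun c => (c.toNat : Int))

-- the padding  s += b"  "[0 : 3 - len(s) % 3]  (shared wording in both Pythons)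
def rad50Pad (l : List Int) : List Int :=
  if l.length % 3 ≠ 0 then l ++ List.replicate (3 - l.length % 3) 32 else l

-- the body of A's for-loop: state (result, n, i); n = none plays Python's None
-- A's inline if/elif translation chain
def rad50ATr (c : Int) : Int :=
  if 97 ≤ c ∧ c ≤ 122 then c - 97 + 1
  else if 65 ≤ c ∧ c ≤ 90 then c - 65 + 1
  else if 48 ≤ c ∧ c ≤ 57 then c - 48 + 30
  else if c = 32 then 0
  else if c = 36 then 27
  else if c = 46 then 28
  else 29

def rad50Step (st : List Int × Option Int × Int) (c : Int) : List Int × Option Int × Int :=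
  let (result, n0, i0) := st
  let (n, i) := match n0 with
    | none => ((0 : Int), (64000 : Int))
    | some v => (v, i0)
  let c := rad50ATr c
  let i := PySem.Int.floordiv i 40
  let n := n + c * i
  if i = 1 then (result ++ [n], none, i) else (result, some n, i)

def rad50 (s : String) : List Int :=
  ((rad50Pad (rad50Bytes s)).foldl rad50Step ([], none, 0)).1

-- ===== PORT B =====
-- B's translation helper t(c)
def rad50T (c : Int) : Int :=
  if 97 ≤ c ∧ c ≤ 122 then c - 97 + 1
  else if 65 ≤ c ∧ c ≤ 90 then c - 65 + 1
  else if 48 ≤ c ∧ c ≤ 57 then c - 48 + 30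
  else if c = 32 then 0
  else if c = 36 then 27
  else if c = 46 then 28
  else 29

-- B's generator: one group value per 3-byte chunk
def rad50Groups : List Int → List Int
  | a :: b :: c :: rest => ((rad50T a * 40 + rad50T b) * 40 + rad50T c) :: rad50Groups rest
  | _ => []

def rad50_alt (s : String) : List Int :=
  rad50Groups (rad50Pad (rad50Bytes s))

-- ===== PRECONDITION & SPEC =====
def Spec_rad50 (s : String) (out : List Int) : Prop := out = rad50_alt s
instance (s : String) (out : List Int) : Decidable (Spec_rad50 s out) := by unfold Spec_rad50; infer_instance

-- ===== CLAIM (what is proved, stated in full; the proofs are below) =====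
def Claim_equal_rad50 : Prop := ∀ (s : String), Dom_rad50 s → Spec_rad50 s (rad50 s)

-- ===== LEMMAS AND PROOFS =====
lemma rad50Pad_mod (l : List Int) : (rad50Pad l).length % 3 = 0 := by
  unfold rad50Pad
  split_ifs with h
  · simp [List.length_append]; omega
  · omega

lemma rad50ATr_eq_T (c : Int) : rad50ATr c = rad50T c := rfl

lemma rad50_step3 (res : List Int) (i a b c : Int) :
    rad50Step (rad50Step (rad50Step (res, none, i) a) b) c
      = (res ++ [(rad50T a * 40 + rad50T b) * 40 + rad50T c], none, 1) := by
  simp only [rad50Step, rad50ATr_eq_T]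
  rw [PySem.Int.floordiv_eq_ediv_of_pos (by norm_num : (0:Int) < 40)]
  norm_num
  ring

lemma rad50_loop_eq (l : List Int) (h : l.length % 3 = 0) :
    ∀ (res : List Int) (i : Int),
      (l.foldl rad50Step (res, none, i)).1 = res ++ rad50Groups l := by
  induction l using rad50Groups.induct with
  | case1 a b c rest ih =>
    intro res i
    have hr : rest.length % 3 = 0 := by simp at h; omega
    simp only [List.foldl_cons]
    rw [rad50_step3, ih hr, rad50Groups]
    simp
  | case2 l hne =>
    intro res i
    match l with
    | [] => simp [rad50Groups]
    | [a] => simp at h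
    | [a, b] => simp at h
    | a :: b :: c :: r => exact absurd rfl (hne a b c r)

-- ===== VERDICT (by name: the statement is the Claim_ definition above) =====
theorem rad50_spec : Claim_equal_rad50 := by
  intro s _
  unfold Spec_rad50 rad50 rad50_alt
  rw [rad50_loop_eq _ (rad50Pad_mod _)]
  simp
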